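-- pv_equiv track=rewrite | github.com/shanto268/Uno_Exercise_Game | project2.py | sortBySpecial
-- ===== SOURCE A (Python) =====
-- def sortBySpecial(z):
--     x = ["skip", "reverse", "draw 2"]
--     sindex = []
--     dindex = []
--     rindex = []
--     for i in range(len(z)):
--         if z[i] == x[0]:
--             sindex.append([z[i]])
--         elif z[i] == x[1]:
--             dindex.append([z[i]])
--         else:
--             rindex.append([z[i]])
--     zsort = sindex + dindex + rindex
--     return zsort
-- ===== SOURCE B (Python) =====
-- def sortBySpecial(z):
--     def prio(w):
--         return 0 if w == ["skip"] else 1 if w == ["reverse"] else 2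
--     return sorted(([e] for e in z), key=prio)
-- ===== Notes on version B (the rewrite author's own statement) =====
-- stated objective: idiomatic
-- what changed: Replaced the single-pass three-bucket partition with a stable sort of the wrapped elements under a 0/1/2 priority key, relying on sort stability to keep original order within groups.
import Mathlib
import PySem

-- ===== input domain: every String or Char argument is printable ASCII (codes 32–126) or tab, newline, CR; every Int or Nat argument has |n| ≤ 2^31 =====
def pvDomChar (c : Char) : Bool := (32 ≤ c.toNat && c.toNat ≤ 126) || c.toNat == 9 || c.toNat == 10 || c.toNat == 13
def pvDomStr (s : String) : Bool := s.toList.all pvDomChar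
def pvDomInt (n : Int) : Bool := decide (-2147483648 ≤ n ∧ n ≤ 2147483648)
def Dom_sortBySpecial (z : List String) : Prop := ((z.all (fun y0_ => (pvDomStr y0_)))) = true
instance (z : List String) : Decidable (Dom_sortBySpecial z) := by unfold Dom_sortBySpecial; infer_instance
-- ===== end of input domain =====

-- B replaces A's single-pass three-bucket partition by a stable sort of the wrapped
-- elements under a 0/1/2 priority key (objective: idiomatic).

-- ===== PORT A =====
def sortBySpecial (z : List String) : List (List String) :=
  let x : List String := ["skip", "reverse", "draw 2"]
  let st := (PySem.List.pyRange 0 z.length 1).foldl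
    (fun (acc : List (List String) × List (List String) × List (List String)) i =>
      let zi := PySem.List.pyGetD z i ""
      if zi = PySem.List.pyGetD x 0 "" then (acc.1 ++ [[zi]], acc.2.1, acc.2.2)
      else if zi = PySem.List.pyGetD x 1 "" then (acc.1, acc.2.1 ++ [[zi]], acc.2.2)
      else (acc.1, acc.2.1, acc.2.2 ++ [[zi]]))
    ([], [], [])
  st.1 ++ st.2.1 ++ st.2.2

-- ===== PORT B =====
def pvPrio (w : List String) : Nat :=
  if w = ["skip"] then 0 else if w = ["reverse"] then 1 else 2

def sortBySpecial_alt (z : List String) : List (List String) :=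
  PySem.List.sorted (z.map (fun e => [e])) pvPrio

-- ===== PRECONDITION & SPEC =====
def Spec_sortBySpecial (z : List String) (out : List (List String)) : Prop := out = sortBySpecial_alt z
instance (z : List String) (out : List (List String)) : Decidable (Spec_sortBySpecial z out) := by unfold Spec_sortBySpecial; infer_instance

-- ===== CLAIM (what is proved, stated in full; the proofs are below) =====
def Claim_equal_sortBySpecial : Prop := ∀ (z : List String), Dom_sortBySpecial z → Spec_sortBySpecial z (sortBySpecial z)

-- ===== LEMMAS AND PROOFS =====

-- the k-th priority group of z, in original order (wrapped)
def pvGrp (k : Nat) (z : List String) : List (List String) :=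
  (z.filter (fun e => pvPrio [e] == k)).map (fun e => [e])

theorem pvGrp_nil (k : Nat) : pvGrp k [] = [] := rfl

theorem pvGrp_cons (k : Nat) (e : String) (z : List String) :
    pvGrp k (e :: z) = (if pvPrio [e] = k then [[e]] else []) ++ pvGrp k z := by
  by_cases h : pvPrio [e] = k <;> simp [pvGrp, h]

-- inserting x before the first element it must precede
theorem insertBy_skip_prefix {α : Type} (p : α → α → Bool) (x : α) (as bs : List α)
    (ha : ∀ y ∈ as, p x y = false) (hb : ∀ y ∈ bs, p x y = true) :
    PySem.List.insertBy p x (as ++ bs) = as ++ x :: bs := by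
  induction as with
  | nil =>
    cases bs with
    | nil => rfl
    | cons b bs =>
      have : p x b = true := hb b (by simp)
      show (if p x b then x :: b :: bs else b :: PySem.List.insertBy p x bs) = x :: b :: bs
      simp [this]
  | cons a as ih =>
    have hpa : p x a = false := ha a (by simp)
    show (if p x a then x :: (a :: (as ++ bs)) else a :: PySem.List.insertBy p x (as ++ bs)) = a :: (as ++ x :: bs)
    simp [hpa, ih (fun y hy => ha y (by simp [hy]))]

-- auxiliary: extend a pointwise property to an appended singleton
theorem forall_append_singleton {α : Type} (P : α → Prop) (xs : List α) (x : α)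
    (h : ∀ y ∈ xs, P y) (hx : P x) : ∀ y ∈ xs ++ [x], P y := by
  intro y hy
  rcases List.mem_append.mp hy with h' | h'
  · exact h y h'
  · rw [List.mem_singleton.mp h']; exact hx

-- invariant of B's insertion-sort fold over grouped accumulators
theorem foldl_ins_grouped (z : List String)
    (g0 g1 g2 : List (List String))
    (h0 : ∀ w ∈ g0, pvPrio w = 0) (h1 : ∀ w ∈ g1, pvPrio w = 1) (h2 : ∀ w ∈ g2, pvPrio w = 2) :
    (z.map (fun e => [e])).foldl
      (fun acc x => PySem.List.insertBy (fun a b => decide (pvPrio a < pvPrio b)) x acc)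
      (g0 ++ g1 ++ g2)
    = (g0 ++ pvGrp 0 z) ++ (g1 ++ pvGrp 1 z) ++ (g2 ++ pvGrp 2 z) := by
  induction z generalizing g0 g1 g2 with
  | nil => simp [pvGrp_nil]
  | cons e z ih =>
    simp only [List.map_cons, List.foldl_cons]
    by_cases hs : ([e] : List String) = ["skip"]
    · have hp : pvPrio [e] = 0 := by simp [pvPrio, hs]
      have : PySem.List.insertBy (fun a b => decide (pvPrio a < pvPrio b)) [e] (g0 ++ g1 ++ g2)
          = (g0 ++ [[e]]) ++ g1 ++ g2 := by
        rw [List.append_assoc, insertBy_skip_prefix _ _ g0 (g1 ++ g2)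
          (fun y hy => by simp [hp, h0 y hy])
          (fun y hy => by
            rcases List.mem_append.mp hy with h | h
            · simp [hp, h1 y h]
            · simp [hp, h2 y h])]
        simp
      rw [this, ih (g0 ++ [[e]]) g1 g2
        (forall_append_singleton (fun w => pvPrio w = 0) g0 [e] h0 hp) h1 h2]
      simp [pvGrp_cons, hp]
    · by_cases hr : ([e] : List String) = ["reverse"]
      · have hp : pvPrio [e] = 1 := by simp [pvPrio, hr]
        have : PySem.List.insertBy (fun a b => decide (pvPrio a < pvPrio b)) [e] (g0 ++ g1 ++ g2)
            = g0 ++ (g1 ++ [[e]]) ++ g2 := by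
          rw [insertBy_skip_prefix _ _ (g0 ++ g1) g2
            (fun y hy => by
              rcases List.mem_append.mp hy with h | h
              · simp [hp, h0 y h]
              · simp [hp, h1 y h])
            (fun y hy => by simp [hp, h2 y hy])]
          simp
        rw [this, ih g0 (g1 ++ [[e]]) g2 h0
          (forall_append_singleton (fun w => pvPrio w = 1) g1 [e] h1 hp) h2]
        simp [pvGrp_cons, hp]
      · have hp : pvPrio [e] = 2 := by simp [pvPrio, hs, hr]
        have : PySem.List.insertBy (fun a b => decide (pvPrio a < pvPrio b)) [e] (g0 ++ g1 ++ g2)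
            = g0 ++ g1 ++ (g2 ++ [[e]]) := by
          rw [PySem.List.insertBy_of_forall_not_before _ _ _
            (fun y hy => by
              rcases List.mem_append.mp hy with h | h
              · rcases List.mem_append.mp h with h' | h'
                · simp [hp, h0 y h']
                · simp [hp, h1 y h']
              · simp [hp, h2 y h])]
          simp
        rw [this, ih g0 g1 (g2 ++ [[e]]) h0 h1
          (forall_append_singleton (fun w => pvPrio w = 2) g2 [e] h2 hp)]
        simp [pvGrp_cons, hp]

-- B computes the three groups in order
theorem alt_eq_groups (z : List String) :
    sortBySpecial_alt z = pvGrp 0 z ++ pvGrp 1 z ++ pvGrp 2 z := by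
  have := foldl_ins_grouped z [] [] [] (by simp) (by simp) (by simp)
  simpa [sortBySpecial_alt, PySem.List.sorted_eq_foldl_insertBy] using this

-- invariant of A's bucket fold
theorem A_foldl (z : List String) (s d r : List (List String)) :
    z.foldl
      (fun (acc : List (List String) × List (List String) × List (List String)) zi =>
        if zi = "skip" then (acc.1 ++ [[zi]], acc.2.1, acc.2.2)
        else if zi = "reverse" then (acc.1, acc.2.1 ++ [[zi]], acc.2.2)
        else (acc.1, acc.2.1, acc.2.2 ++ [[zi]]))
      (s, d, r)
    = (s ++ pvGrp 0 z, d ++ pvGrp 1 z, r ++ pvGrp 2 z) := by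
  induction z generalizing s d r with
  | nil => simp [pvGrp_nil]
  | cons e z ih =>
    simp only [List.foldl_cons]
    by_cases hs : e = "skip"
    · simp only [if_pos hs, ih]
      simp [pvGrp_cons, pvPrio, hs]
    · by_cases hr : e = "reverse"
      · simp only [if_neg hs, if_pos hr, ih]
        simp [pvGrp_cons, pvPrio, hr]
      · simp only [if_neg hs, if_neg hr, ih]
        simp [pvGrp_cons, pvPrio, hs, hr]

theorem A_eq_groups (z : List String) :
    sortBySpecial z = pvGrp 0 z ++ pvGrp 1 z ++ pvGrp 2 z := by
  show (fun st : List (List String) × List (List String) × List (List String) =>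
        st.1 ++ st.2.1 ++ st.2.2)
      ((PySem.List.pyRange 0 (z.length : Int) 1).foldl
        (fun (acc : List (List String) × List (List String) × List (List String)) i =>
          (fun acc (zi : String) =>
            if zi = "skip" then (acc.1 ++ [[zi]], acc.2.1, acc.2.2)
            else if zi = "reverse" then (acc.1, acc.2.1 ++ [[zi]], acc.2.2)
            else (acc.1, acc.2.1, acc.2.2 ++ [[zi]])) acc (PySem.List.pyGetD z i ""))
        ([], [], []))
    = pvGrp 0 z ++ pvGrp 1 z ++ pvGrp 2 z
  rw [PySem.List.foldl_pyRange_zero_pyGetD' z ""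
    (fun (acc : List (List String) × List (List String) × List (List String)) zi =>
      if zi = "skip" then (acc.1 ++ [[zi]], acc.2.1, acc.2.2)
      else if zi = "reverse" then (acc.1, acc.2.1 ++ [[zi]], acc.2.2)
      else (acc.1, acc.2.1, acc.2.2 ++ [[zi]])) ([], [], [])]
  rw [A_foldl z [] [] []]
  simp

-- ===== VERDICT (by name: the statement is the Claim_ definition above) =====
theorem sortBySpecial_spec : Claim_equal_sortBySpecial := by
  intro z _
  show sortBySpecial z = sortBySpecial_alt z
  rw [A_eq_groups, alt_eq_groups]
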